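-- pv_equiv track=rewrite | github.com/empovit/nvidia-ci | workflows/gpu_operator_versions/catalog_checker.py | parse_bundle_availability
-- ===== SOURCE A (Python) =====
-- def parse_bundle_availability(
--     bundles: list[dict],
--     gpu_versions: list[str],
--     ocp_versions: list[str]
-- ) -> dict[str, dict[str, bool]]:
--     """Parse bundles and build availability matrix."""
--     normalized_gpu_versions = set(v.lstrip('v') for v in gpu_versions)
--     ocp_versions_set = set(ocp_versions)
--
--     # Initialize matrix with False
--     results = {gpu_ver: {ocp: False for ocp in ocp_versions} for gpu_ver in gpu_versions}
--
--     # Mark available combinations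
--     for bundle in bundles:
--         bundle_version = bundle.get('version', '').lstrip('v')
--         ocp_version = bundle.get('ocp_version')
--
--         if bundle_version in normalized_gpu_versions and ocp_version in ocp_versions_set:
--             for orig_ver in gpu_versions:
--                 if orig_ver.lstrip('v') == bundle_version:
--                     results[orig_ver][ocp_version] = True
--
--     return results
-- ===== SOURCE B (Python) =====
-- def parse_bundle_availability(bundles, gpu_versions, ocp_versions):
--     """Availability matrix via one precomputed set of available (gpu, ocp) pairs."""
--     gpu_set = {g.lstrip('v') for g in gpu_versions}
--     ocp_set = set(ocp_versions)
--     avail = {(b.get('version', '').lstrip('v'), b.get('ocp_version'))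
--              for b in bundles
--              if b.get('version', '').lstrip('v') in gpu_set
--              and b.get('ocp_version') in ocp_set}
--     return {g: {o: (g.lstrip('v'), o) in avail for o in ocp_versions}
--             for g in gpu_versions}
-- ===== Notes on version B (the rewrite author's own statement) =====
-- stated objective: alternative
-- what changed: Replaces A's False-prefilled matrix mutated by a marking pass with a nested search loop (for each qualifying bundle, scan all gpu_versions for normalized matches) by a single pass that collects the set of available normalized (gpu, ocp) pairs and then fills every grid cell directly by one set-membership test.
import Mathlib
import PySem

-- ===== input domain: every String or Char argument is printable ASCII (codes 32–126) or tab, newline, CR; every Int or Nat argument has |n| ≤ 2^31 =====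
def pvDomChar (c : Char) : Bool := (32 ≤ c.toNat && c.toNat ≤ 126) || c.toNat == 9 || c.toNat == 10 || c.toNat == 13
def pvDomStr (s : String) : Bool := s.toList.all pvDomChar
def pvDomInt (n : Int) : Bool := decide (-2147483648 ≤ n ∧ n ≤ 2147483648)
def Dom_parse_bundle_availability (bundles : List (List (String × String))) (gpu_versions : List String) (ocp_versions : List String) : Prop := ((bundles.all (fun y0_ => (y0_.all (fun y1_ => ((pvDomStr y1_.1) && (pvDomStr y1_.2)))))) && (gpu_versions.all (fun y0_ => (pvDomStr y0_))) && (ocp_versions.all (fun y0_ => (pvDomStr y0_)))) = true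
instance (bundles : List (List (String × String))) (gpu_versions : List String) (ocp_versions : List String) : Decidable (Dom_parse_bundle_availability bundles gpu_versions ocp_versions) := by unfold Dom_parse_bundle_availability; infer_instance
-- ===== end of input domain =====

-- B replaces A's False-prefilled matrix plus a marking pass (nested scan of gpu_versions per bundle)
-- by one pass collecting the set of available normalized (gpu, ocp) pairs and a direct per-cell
-- membership test; objective: alternative decomposition (same cost class).

-- ===== PORT A =====
-- exact port of s.lstrip('v'): drop all leading 'v' characters
def pvStripV (s : String) : String := String.ofList (s.toList.dropWhile (· == 'v'))

-- {gpu: {ocp: f gpu ocp for ocp in ocps} for gpu in gpus} — the nested dict comprehension both Pythons build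
def pvRow (ocps : List String) (r : String → Bool) : PySem.Dict String Bool :=
  ocps.foldl (fun d o => d.insert o (r o)) PySem.Dict.empty

def pvGrid (gpus ocps : List String) (f : String → String → Bool) : PySem.Dict String (PySem.Dict String Bool) :=
  gpus.foldl (fun d g => d.insert g (pvRow ocps (f g))) PySem.Dict.empty

def parse_bundle_availability (bundles : List (List (String × String))) (gpu_versions : List String) (ocp_versions : List String) : List (String × List (String × Bool)) :=
  let normalized_gpu_versions : PySem.Set String := PySem.Set.ofList (gpu_versions.map pvStripV)
  let ocp_versions_set : PySem.Set String := PySem.Set.ofList ocp_versions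
  -- results = {gpu_ver: {ocp: False for ocp in ocp_versions} for gpu_ver in gpu_versions}
  let results := pvGrid gpu_versions ocp_versions (fun _ _ => false)
  -- for bundle in bundles: …
  let final := bundles.foldl (fun res bundle =>
    let bundle_version := pvStripV ((PySem.Dict.mk bundle).getD "version" "")
    match (PySem.Dict.mk bundle).get? "ocp_version" with
    | none => res      -- ocp_version = None: 'None in set' is False, condition fails
    | some ocp_version =>
      if normalized_gpu_versions.contains bundle_version && ocp_versions_set.contains ocp_version then
        gpu_versions.foldl (fun res2 orig_ver =>
          if pvStripV orig_ver == bundle_version then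
            res2.modify orig_ver PySem.Dict.empty (fun inner => inner.insert ocp_version true)
          else res2) res
      else res) results
  final.items.map (fun p => (p.1, p.2.items))

-- ===== PORT B =====
def parse_bundle_availability_alt (bundles : List (List (String × String))) (gpu_versions : List String) (ocp_versions : List String) : List (String × List (String × Bool)) :=
  let gpu_set : PySem.Set String := PySem.Set.ofList (gpu_versions.map pvStripV)
  let ocp_set : PySem.Set String := PySem.Set.ofList ocp_versions
  -- avail = {(b.get('version','').lstrip('v'), b.get('ocp_version')) for b in bundles if … in gpu_set and … in ocp_set}
  let avail : PySem.Set (String × String) := PySem.Set.ofList (bundles.filterMap (fun b =>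
    match (PySem.Dict.mk b).get? "ocp_version" with
    | none => none     -- b.get('ocp_version') = None is never in ocp_set
    | some o =>
      let v := pvStripV ((PySem.Dict.mk b).getD "version" "")
      if gpu_set.contains v && ocp_set.contains o then some (v, o) else none))
  -- {g: {o: (g.lstrip('v'), o) in avail for o in ocp_versions} for g in gpu_versions}
  (pvGrid gpu_versions ocp_versions (fun g o => avail.contains (pvStripV g, o))).items.map (fun p => (p.1, p.2.items))

-- ===== PRECONDITION & SPEC =====
def Spec_parse_bundle_availability (bundles : List (List (String × String))) (gpu_versions : List String) (ocp_versions : List String) (out : List (String × List (String × Bool))) : Prop := out = parse_bundle_availability_alt bundles gpu_versions ocp_versions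
instance (bundles : List (List (String × String))) (gpu_versions : List String) (ocp_versions : List String) (out : List (String × List (String × Bool))) : Decidable (Spec_parse_bundle_availability bundles gpu_versions ocp_versions out) := by unfold Spec_parse_bundle_availability; infer_instance

-- ===== CLAIM (what is proved, stated in full; the proofs are below) =====
def Claim_equal_parse_bundle_availability : Prop := ∀ (bundles : List (List (String × String))) (gpu_versions : List String) (ocp_versions : List String), Dom_parse_bundle_availability bundles gpu_versions ocp_versions → Spec_parse_bundle_availability bundles gpu_versions ocp_versions (parse_bundle_availability bundles gpu_versions ocp_versions)

-- ===== LEMMAS AND PROOFS =====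

-- A bundle's normalized version and its ocp value, and whether it marks cell (g, o) in A's loop
def pvBV (b : List (String × String)) : String := pvStripV ((PySem.Dict.mk b).getD "version" "")
def pvOC (b : List (String × String)) : Option String := (PySem.Dict.mk b).get? "ocp_version"
def pvHit (gset oset : PySem.Set String) (b : List (String × String)) (g o : String) : Bool :=
  match pvOC b with
  | none => false
  | some o' => gset.contains (pvBV b) && oset.contains o' && (pvStripV g == pvBV b) && (o' == o)

theorem pv_foldl_insert_getD {ν : Type} (v : String → ν) (dflt : ν) :
    ∀ (l : List String) (d : PySem.Dict String ν) (x : String),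
      (l.foldl (fun d k => d.insert k (v k)) d).getD x dflt
        = if x ∈ l then v x else d.getD x dflt := by
  intro l
  induction l with
  | nil => intro d x; simp
  | cons k t ih =>
    intro d x
    simp only [List.foldl_cons, ih, PySem.Dict.getD_insert, List.mem_cons]
    by_cases ht : x ∈ t <;> by_cases hk : x = k <;> simp [ht, hk]

theorem pvRow_getD (ocps : List String) (r : String → Bool) (o : String) (ho : o ∈ ocps) :
    (pvRow ocps r).getD o false = r o := by
  unfold pvRow
  rw [pv_foldl_insert_getD (fun o => r o) false ocps PySem.Dict.empty o]
  simp [ho]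

theorem pvRow_keys (ocps : List String) (r : String → Bool) :
    (pvRow ocps r).keys = PySem.Set.ofList ocps := by
  unfold pvRow
  rw [PySem.Dict.keys_foldl_insert ocps (fun _ o => r o) PySem.Dict.empty]
  simp [PySem.Set.update_nil_left]

theorem pvGrid_getD (gpus ocps : List String) (f : String → String → Bool) (g : String) (hg : g ∈ gpus) :
    (pvGrid gpus ocps f).getD g PySem.Dict.empty = pvRow ocps (f g) := by
  unfold pvGrid
  rw [pv_foldl_insert_getD (fun g => pvRow ocps (f g)) PySem.Dict.empty gpus PySem.Dict.empty g]
  simp [hg]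

theorem pvGrid_keys (gpus ocps : List String) (f : String → String → Bool) :
    (pvGrid gpus ocps f).keys = PySem.Set.ofList gpus := by
  unfold pvGrid
  rw [PySem.Dict.keys_foldl_insert gpus (fun _ g => pvRow ocps (f g)) PySem.Dict.empty]
  simp [PySem.Set.update_nil_left]

theorem pv_dict_eq_of_keys_getD {ν : Type} (d d' : PySem.Dict String ν) (dflt : ν)
    (h1 : d.keys = d'.keys) (hn : d.keys.Nodup)
    (h2 : ∀ k ∈ d.keys, d.getD k dflt = d'.getD k dflt) : d = d' := by
  apply PySem.Dict.ext
  rw [PySem.Dict.items_eq_map_keys d hn dflt, PySem.Dict.items_eq_map_keys d' (h1 ▸ hn) dflt, ← h1]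
  exact List.map_congr_left (fun k hk => by rw [h2 k hk])

theorem pvRow_insert (ocps : List String) (r : String → Bool) (o' : String) (ho : o' ∈ ocps) :
    (pvRow ocps r).insert o' true = pvRow ocps (fun o => if o = o' then true else r o) := by
  have hc : (pvRow ocps r).contains o' = true := by
    rw [PySem.Dict.contains_iff_mem_keys, pvRow_keys]
    exact (PySem.Set.mem_ofList ocps o').mpr ho
  apply pv_dict_eq_of_keys_getD _ _ false
  · rw [PySem.Dict.keys_insert_of_contains _ _ hc, pvRow_keys, pvRow_keys]
  · rw [PySem.Dict.keys_insert_of_contains _ _ hc, pvRow_keys]; exact PySem.Set.nodup_ofList ocps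
  · intro k hk
    rw [PySem.Dict.keys_insert_of_contains _ _ hc, pvRow_keys] at hk
    have hk' : k ∈ ocps := (PySem.Set.mem_ofList ocps k).mp hk
    rw [PySem.Dict.getD_insert, pvRow_getD _ _ _ hk', pvRow_getD _ _ _ hk']

-- the getD value of A's inner marking loop over gpu_versions
theorem pv_markfold_getD (bv o' : String) :
    ∀ (l : List String) (res : PySem.Dict String (PySem.Dict String Bool)) (g' : String),
      (l.foldl (fun res2 g =>
          if pvStripV g == bv then
            res2.modify g PySem.Dict.empty (fun inner => inner.insert o' true)
          else res2) res).getD g' PySem.Dict.empty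
        = if g' ∈ l ∧ pvStripV g' = bv
            then (res.getD g' PySem.Dict.empty).insert o' true
            else res.getD g' PySem.Dict.empty := by
  intro l
  induction l with
  | nil => intro res g'; simp
  | cons g t ih =>
    intro res g'
    simp only [List.foldl_cons]
    by_cases hgb : pvStripV g = bv
    · simp only [hgb, beq_self_eq_true, if_true, ih, PySem.Dict.getD_modify, List.mem_cons]
      by_cases hg : g' = g
      · subst hg
        by_cases htm : g' ∈ t
        · simp [htm, hgb, PySem.Dict.insert_insert_self]
        · simp [htm, hgb]
      · by_cases ht : g' ∈ t ∧ pvStripV g' = bv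
        · simp [ht, hg]
        · simp [ht, hg]
    · have hne : (pvStripV g == bv) = false := by simp [hgb]
      simp only [hne, Bool.false_eq_true, if_false, ih, List.mem_cons]
      by_cases ht : g' ∈ t ∧ pvStripV g' = bv
      · simp [ht]
      · have : ¬ ((g' = g ∨ g' ∈ t) ∧ pvStripV g' = bv) := by
          rintro ⟨hm | hm, hb⟩
          · subst hm; exact hgb hb
          · exact ht ⟨hm, hb⟩
        simp [ht, this]

-- A's inner marking loop preserves the key list of the grid
theorem pv_markfold_keys (bv o' : String) :
    ∀ (l : List String) (res : PySem.Dict String (PySem.Dict String Bool)),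
      (∀ g ∈ l, g ∈ res.keys) →
      (l.foldl (fun res2 g =>
          if pvStripV g == bv then
            res2.modify g PySem.Dict.empty (fun inner => inner.insert o' true)
          else res2) res).keys = res.keys := by
  intro l
  induction l with
  | nil => intro res _; simp
  | cons g t ih =>
    intro res hmem
    simp only [List.foldl_cons]
    by_cases hgb : pvStripV g = bv
    · have hc : res.contains g = true :=
        (PySem.Dict.contains_iff_mem_keys res g).mpr (hmem g (by simp))
      have hk : (res.modify g PySem.Dict.empty (fun inner => inner.insert o' true)).keys = res.keys := by
        rw [PySem.Dict.keys_modify, PySem.Dict.keys_insert_of_contains _ _ hc]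
      simp only [hgb, beq_self_eq_true, if_true]
      rw [ih _ (fun x hx => hk ▸ hmem x (by simp [hx])), hk]
    · have hne : (pvStripV g == bv) = false := by simp [hgb]
      simp only [hne, Bool.false_eq_true, if_false]
      exact ih _ (fun x hx => hmem x (by simp [hx]))

-- processing one bundle turns a grid into a grid with the hit cells set
theorem pv_markOne (gpus ocps : List String) (f : String → String → Bool) (b : List (String × String)) :
    (let bundle_version := pvStripV ((PySem.Dict.mk b).getD "version" "")
     match (PySem.Dict.mk b).get? "ocp_version" with
     | none => pvGrid gpus ocps f
     | some ocp_version =>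
       if (PySem.Set.ofList (gpus.map pvStripV)).contains bundle_version
           && (PySem.Set.ofList ocps).contains ocp_version then
         gpus.foldl (fun res2 orig_ver =>
           if pvStripV orig_ver == bundle_version then
             res2.modify orig_ver PySem.Dict.empty (fun inner => inner.insert ocp_version true)
           else res2) (pvGrid gpus ocps f)
       else pvGrid gpus ocps f)
    = pvGrid gpus ocps (fun g o =>
        f g o || pvHit (PySem.Set.ofList (gpus.map pvStripV)) (PySem.Set.ofList ocps) b g o) := by
  simp only [pvHit, pvBV, pvOC]
  cases hoc : (PySem.Dict.mk b).get? "ocp_version" with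
  | none => simp
  | some o' =>
    simp only []
    by_cases hguard : ((PySem.Set.ofList (gpus.map pvStripV)).contains
        (pvStripV ((PySem.Dict.mk b).getD "version" ""))
        && (PySem.Set.ofList ocps).contains o') = true
    · rw [if_pos hguard]
      have ho' : o' ∈ ocps := by
        have := (Bool.and_eq_true _ _).mp hguard |>.2
        exact (PySem.Set.mem_ofList ocps o').mp ((PySem.Set.contains_iff _ _).mp this)
      set bv := pvStripV ((PySem.Dict.mk b).getD "version" "") with hbv
      apply pv_dict_eq_of_keys_getD _ _ PySem.Dict.empty
      · rw [pv_markfold_keys bv o' gpus (pvGrid gpus ocps f)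
            (fun g hg => by rw [pvGrid_keys]; exact (PySem.Set.mem_ofList gpus g).mpr hg),
          pvGrid_keys, pvGrid_keys]
      · rw [pv_markfold_keys bv o' gpus (pvGrid gpus ocps f)
            (fun g hg => by rw [pvGrid_keys]; exact (PySem.Set.mem_ofList gpus g).mpr hg),
          pvGrid_keys]
        exact PySem.Set.nodup_ofList gpus
      · intro g' hg'
        rw [pv_markfold_keys bv o' gpus (pvGrid gpus ocps f)
            (fun g hg => by rw [pvGrid_keys]; exact (PySem.Set.mem_ofList gpus g).mpr hg),
          pvGrid_keys] at hg'
        have hg'' : g' ∈ gpus := (PySem.Set.mem_ofList gpus g').mp hg'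
        rw [pv_markfold_getD bv o' gpus (pvGrid gpus ocps f) g', pvGrid_getD _ _ _ _ hg'',
          pvGrid_getD _ _ _ _ hg'']
        by_cases hmatch : pvStripV g' = bv
        · rw [if_pos ⟨hg'', hmatch⟩, pvRow_insert _ _ _ ho']
          congr 1
          funext o
          have : (pvStripV g' == bv) = true := by simp [hmatch]
          simp only [hguard, this, Bool.true_and, Bool.and_true]
          by_cases hoo : o = o'
          · simp [hoo]
          · have hne : (o' == o) = false := by
              rw [beq_eq_false_iff_ne]; exact Ne.symm hoo
            simp [hoo, hne]
        · rw [if_neg (fun h => hmatch h.2)]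
          congr 1
          funext o
          have : (pvStripV g' == bv) = false := by simp [hmatch]
          simp [this]
    · rw [if_neg hguard]
      congr 1
      funext g o
      have hbool : ((PySem.Set.ofList (gpus.map pvStripV)).contains
          (pvStripV ((PySem.Dict.mk b).getD "version" ""))
          && (PySem.Set.ofList ocps).contains o') = false := Bool.eq_false_iff.mpr hguard
      simp only [hbool, Bool.false_and, Bool.or_false]

-- A's whole bundle loop, characterised as a grid of hit-tests
theorem pv_mark_all (gpus ocps : List String) :
    ∀ (bs : List (List (String × String))) (f : String → String → Bool),
      bs.foldl (fun res bundle =>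
        let bundle_version := pvStripV ((PySem.Dict.mk bundle).getD "version" "")
        match (PySem.Dict.mk bundle).get? "ocp_version" with
        | none => res
        | some ocp_version =>
          if (PySem.Set.ofList (gpus.map pvStripV)).contains bundle_version
              && (PySem.Set.ofList ocps).contains ocp_version then
            gpus.foldl (fun res2 orig_ver =>
              if pvStripV orig_ver == bundle_version then
                res2.modify orig_ver PySem.Dict.empty (fun inner => inner.insert ocp_version true)
              else res2) res
          else res) (pvGrid gpus ocps f)
      = pvGrid gpus ocps (fun g o =>
          f g o || bs.any (fun b =>
            pvHit (PySem.Set.ofList (gpus.map pvStripV)) (PySem.Set.ofList ocps) b g o)) := by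
  intro bs
  induction bs with
  | nil => intro f; simp
  | cons b t ih =>
    intro f
    simp only [List.foldl_cons]
    rw [show (let bundle_version := pvStripV ((PySem.Dict.mk b).getD "version" "")
        match (PySem.Dict.mk b).get? "ocp_version" with
        | none => pvGrid gpus ocps f
        | some ocp_version =>
          if (PySem.Set.ofList (gpus.map pvStripV)).contains bundle_version
              && (PySem.Set.ofList ocps).contains ocp_version then
            gpus.foldl (fun res2 orig_ver =>
              if pvStripV orig_ver == bundle_version then
                res2.modify orig_ver PySem.Dict.empty (fun inner => inner.insert ocp_version true)
              else res2) (pvGrid gpus ocps f)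
          else pvGrid gpus ocps f)
        = pvGrid gpus ocps (fun g o =>
            f g o || pvHit (PySem.Set.ofList (gpus.map pvStripV)) (PySem.Set.ofList ocps) b g o)
      from pv_markOne gpus ocps f b]
    rw [ih]
    congr 1
    funext g o
    simp [Bool.or_assoc]

-- one bundle's hit-test at (g, o) is exactly 'it contributes the pair (pvStripV g, o) to avail'
theorem pv_hit_pick (gset oset : PySem.Set String) (b : List (String × String)) (g o : String) :
    (pvHit gset oset b g o = true) ↔
    ((match (PySem.Dict.mk b).get? "ocp_version" with
      | none => none
      | some o' =>
        let v := pvStripV ((PySem.Dict.mk b).getD "version" "")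
        if gset.contains v && oset.contains o' then some (v, o') else none)
      = some (pvStripV g, o)) := by
  unfold pvHit pvBV pvOC
  cases hocb : (PySem.Dict.mk b).get? "ocp_version" with
  | none => simp
  | some o' =>
    simp only []
    by_cases hgd : (gset.contains (pvStripV ((PySem.Dict.mk b).getD "version" ""))
        && oset.contains o') = true
    · rw [if_pos hgd]
      simp only [hgd, Bool.true_and, Bool.and_eq_true, beq_iff_eq, Option.some.injEq,
        Prod.mk.injEq]
      constructor
      · rintro ⟨h1, h2⟩; exact ⟨h1.symm, h2⟩
      · rintro ⟨h1, h2⟩; exact ⟨h1.symm, h2⟩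
    · rw [if_neg hgd]
      have hbool : (gset.contains (pvStripV ((PySem.Dict.mk b).getD "version" ""))
          && oset.contains o') = false := Bool.eq_false_iff.mpr hgd
      simp only [hbool, Bool.false_and]
      simp

-- the hit-test over all bundles is exactly B's membership in avail
theorem pv_cell (gpus ocps : List String) (bs : List (List (String × String))) (g o : String) :
    bs.any (fun b =>
        pvHit (PySem.Set.ofList (gpus.map pvStripV)) (PySem.Set.ofList ocps) b g o)
      = (PySem.Set.ofList (bs.filterMap (fun b =>
          match (PySem.Dict.mk b).get? "ocp_version" with
          | none => none
          | some o' =>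
            let v := pvStripV ((PySem.Dict.mk b).getD "version" "")
            if (PySem.Set.ofList (gpus.map pvStripV)).contains v
                && (PySem.Set.ofList ocps).contains o' then some (v, o') else none))).contains
          (pvStripV g, o) := by
  rw [Bool.eq_iff_iff, List.any_eq_true, PySem.Set.contains_iff, PySem.Set.mem_ofList,
    List.mem_filterMap]
  constructor
  · rintro ⟨b, hb, hhit⟩
    exact ⟨b, hb, (pv_hit_pick _ _ b g o).mp hhit⟩
  · rintro ⟨b, hb, hpick⟩
    exact ⟨b, hb, (pv_hit_pick _ _ b g o).mpr hpick⟩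

-- ===== VERDICT (by name: the statement is the Claim_ definition above) =====
theorem parse_bundle_availability_spec : Claim_equal_parse_bundle_availability := by
  intro bundles gpus ocps _
  unfold Spec_parse_bundle_availability parse_bundle_availability parse_bundle_availability_alt
  simp only []
  rw [pv_mark_all gpus ocps bundles (fun _ _ => false)]
  congr 2
  congr 1
  funext g o
  simp only [Bool.false_or]
  exact pv_cell gpus ocps bundles g o
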